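-- pv_equiv track=rewrite | github.com/samuelstevens/arxiv-edits | arxivedits/tex.py | removeBadMath
-- ===== SOURCE A (Python) =====
-- def removeBadMath(content: str) -> str:
--     r"""
--     Changes modern LaTeX sequences such as `\( \)` and `\[ \]` to `$ $`.
--     """
--     # result is a list of lines
--     result = []
--     pos = 0
--
--     while pos < len(content) - 1:
--         # if the current 2 chars are \(
--         if content[pos : pos + 2] == "\\(":
--             # if the previous character was not \ (so the entire sequence is NOT "\\(" )
--             if not (pos > 0 and content[pos - 1] == "\\"):
--                 # add a $ for Latex math
--                 result.append(" $ ")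
--                 # go past these two chars
--                 pos += 2
--                 # start loop again
--                 continue
--
--         # if the 2 current chars are \(
--         if content[pos : pos + 2] == "\\)":
--             # making sure the slash isn't escaped
--             if not (pos > 0 and content[pos - 1] == "\\"):
--                 result.append(" $ ")
--                 pos += 2
--                 continue
--
--         # if the 2 current chars are \[
--         if content[pos : pos + 2] == "\\[":
--             if not (pos > 0 and content[pos - 1] == "\\"):
--                 result.append(" $$ ")
--                 pos += 2
--                 continue
--
--         # if the 2 current chars are \]
--         if content[pos : pos + 2] == "\\]":
--             if not (pos > 0 and content[pos - 1] == "\\"):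
--                 result.append(" $$ ")
--                 pos += 2
--                 continue
--
--         # if this position isn't one of those char sequences, append a single character
--         result.append(content[pos])
--         pos += 1
--
--     # sometimes you'll end up without the last char.
--     if pos < len(content):
--         result.append(content[pos])
--
--     # rejoin the string
--     return "".join(result)
-- ===== SOURCE B (Python) =====
-- import re
--
-- _BAD_MATH = re.compile(r"(?<!\\)\\([()\[\]])")
--
--
-- def removeBadMath(content: str) -> str:
--     r"""
--     Changes modern LaTeX sequences such as `\( \)` and `\[ \]` to `$ $`.
--     """
--     return _BAD_MATH.sub(
--         lambda m: " $ " if m.group(1) in "()" else " $$ ", content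
--     )
-- ===== Notes on version B (the rewrite author's own statement) =====
-- stated objective: idiomatic
-- what changed: The manual position-stepping scanner with four duplicated two-char / escape-check branches is replaced by a single compiled regular-expression substitution re.sub(r'(?<!\\)\\([()\[\]])', ...) whose lookbehind expresses the escape guard; no explicit loop, position counter or per-char append remains.
import Mathlib
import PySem

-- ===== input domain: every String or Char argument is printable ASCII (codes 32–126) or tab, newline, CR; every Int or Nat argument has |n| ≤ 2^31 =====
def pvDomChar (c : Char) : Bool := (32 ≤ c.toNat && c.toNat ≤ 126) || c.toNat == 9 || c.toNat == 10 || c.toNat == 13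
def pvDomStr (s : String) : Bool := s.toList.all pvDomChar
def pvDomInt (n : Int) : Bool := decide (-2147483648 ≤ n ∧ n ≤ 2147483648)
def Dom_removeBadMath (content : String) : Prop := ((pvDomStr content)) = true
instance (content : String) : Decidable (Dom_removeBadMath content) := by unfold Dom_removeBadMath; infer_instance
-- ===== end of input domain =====

-- B replaces A's manual position-stepping scanner (four duplicated two-char branches with an
-- escape check) by a single regular-expression substitution; same result, more idiomatic.


-- ===== PORT A =====
-- the while-loop of A, over cs = content.toList; pos is the 0-based position.
-- content[pos:pos+2] = (cs.drop pos).take 2 and content[pos-1] (guarded by pos > 0)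
-- = cs[pos-1]? — exact, since 0 ≤ pos and the slice bounds are nonnegative.
def removeBadMathGo (cs : List Char) (pos : Nat) : List String :=
  if h : pos < cs.length - 1 then
    -- the four `if content[pos:pos+2] == "\X"` branches, each with its escape check
    if (cs.drop pos).take 2 = ['\\', '('] ∧ ¬(0 < pos ∧ cs[pos - 1]? = some '\\') then
      " $ " :: removeBadMathGo cs (pos + 2)
    else if (cs.drop pos).take 2 = ['\\', ')'] ∧ ¬(0 < pos ∧ cs[pos - 1]? = some '\\') then
      " $ " :: removeBadMathGo cs (pos + 2)
    else if (cs.drop pos).take 2 = ['\\', '['] ∧ ¬(0 < pos ∧ cs[pos - 1]? = some '\\') then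
      " $$ " :: removeBadMathGo cs (pos + 2)
    else if (cs.drop pos).take 2 = ['\\', ']'] ∧ ¬(0 < pos ∧ cs[pos - 1]? = some '\\') then
      " $$ " :: removeBadMathGo cs (pos + 2)
    else
      (cs[pos]!).toString :: removeBadMathGo cs (pos + 1)
  else
    -- trailing `if pos < len(content): result.append(content[pos])`
    if pos < cs.length then [(cs[pos]!).toString] else []
termination_by cs.length - pos
decreasing_by
  all_goals
    first
    | exact Nat.sub_lt_sub_left (Nat.lt_of_lt_of_le h (Nat.sub_le _ _))
        (Nat.lt_add_of_pos_right Nat.zero_lt_two)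
    | exact Nat.sub_lt_sub_left (Nat.lt_of_lt_of_le h (Nat.sub_le _ _)) (Nat.lt_succ_self pos)

def removeBadMath (content : String) : String :=
  PySem.Str.join "" (removeBadMathGo content.toList 0)    -- "".join(result)

-- ===== PORT B =====
-- hand port (PySem has no regexes) of re.sub(r"(?<!\\)\\([()\[\]])", f, content):
-- re.sub scans left to right for a backslash followed by a captured delimiter; the one-char
-- negative lookbehind (?<!\\) inspects the character just before the match position (absent at
-- the string start), which the scan carries along as `prev`; on a match the replacement
-- function maps "()" to " $ " and "[]" to " $$ " and the scan resumes after the match.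
def removeBadMathAltGo (prev : Option Char) (cs : List Char) : List Char :=
  match cs with
  | c :: c2 :: rest =>
    if c = '\\' ∧ (c2 = '(' ∨ c2 = ')' ∨ c2 = '[' ∨ c2 = ']') ∧ prev ≠ some '\\' then
      (if c2 = '(' ∨ c2 = ')' then " $ ".toList else " $$ ".toList) ++
        removeBadMathAltGo (some c2) rest
    else
      c :: removeBadMathAltGo (some c) (c2 :: rest)
  | [c] => [c]
  | [] => []

def removeBadMath_alt (content : String) : String :=
  String.ofList (removeBadMathAltGo none content.toList)

-- ===== PRECONDITION & SPEC =====
def Spec_removeBadMath (content : String) (out : String) : Prop := out = removeBadMath_alt content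
instance (content : String) (out : String) : Decidable (Spec_removeBadMath content out) := by unfold Spec_removeBadMath; infer_instance

-- ===== CLAIM (what is proved, stated in full; the proofs are below) =====
def Claim_equal_removeBadMath : Prop := ∀ (content : String), Dom_removeBadMath content → Spec_removeBadMath content (removeBadMath content)

-- ===== LEMMAS AND PROOFS =====
theorem join_nil_cons (a : List Char) (l : List (List Char)) :
    PySem.Chars.join [] (a :: l) = a ++ PySem.Chars.join [] l := by
  cases l with
  | nil => simp [PySem.Chars.join_singleton, PySem.Chars.join_nil]
  | cons b t => simp [PySem.Chars.join_cons_cons]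

theorem drop_cons_of_lt (cs : List Char) (pos : Nat) (h : pos < cs.length) :
    cs.drop pos = cs[pos] :: cs.drop (pos + 1) :=
  List.drop_eq_getElem_cons h

-- the scan `prev` equals the original character just before the position
theorem token_case (cs : List Char) (pos : Nat) (d : Char) (repl : String)
    (hd : d = '(' ∨ d = ')' ∨ d = '[' ∨ d = ']')
    (hrepl : repl = if d = '(' ∨ d = ')' then " $ " else " $$ ")
    (hlt : pos < cs.length - 1)
    (htk : (cs.drop pos).take 2 = ['\\', d])
    (hesc : ¬(0 < pos ∧ cs[pos - 1]? = some '\\'))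
    (ih : PySem.Chars.join [] ((removeBadMathGo cs (pos + 2)).map String.toList)
          = removeBadMathAltGo (if pos + 2 = 0 then none else cs[pos + 2 - 1]?) (cs.drop (pos + 2))) :
    PySem.Chars.join [] ((repl :: removeBadMathGo cs (pos + 2)).map String.toList)
      = removeBadMathAltGo (if pos = 0 then none else cs[pos - 1]?) (cs.drop pos) := by
  have hp : pos < cs.length := by omega
  have hp1 : pos + 1 < cs.length := by omega
  have e1 : cs.drop pos = cs[pos] :: cs[pos + 1] :: cs.drop (pos + 2) := by
    rw [drop_cons_of_lt cs pos hp, drop_cons_of_lt cs (pos + 1) hp1]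
  rw [e1] at htk
  simp only [List.take_succ_cons, List.take_zero, List.cons.injEq, and_true] at htk
  obtain ⟨hc0, hc1⟩ := htk
  have hprev : (if pos = 0 then (none : Option Char) else cs[pos - 1]?) ≠ some '\\' := by
    rcases Nat.eq_zero_or_pos pos with h0 | h0
    · simp [h0]
    · rw [if_neg (by omega)]
      intro hc
      exact hesc ⟨h0, hc⟩
  have e2 : (if pos + 2 = 0 then (none : Option Char) else cs[pos + 2 - 1]?) = some d := by
    rw [if_neg (by omega)]
    show cs[pos + 1]? = some d
    rw [List.getElem?_eq_getElem hp1, hc1]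
  rw [List.map_cons, join_nil_cons, ih, e2, e1, hc0, hc1]
  simp only [removeBadMathAltGo]
  rw [if_pos ⟨trivial, hd, hprev⟩]
  subst hrepl
  congr 1
  split_ifs <;> rfl

theorem goA_eq_goB (cs : List Char) (pos : Nat) :
    PySem.Chars.join [] ((removeBadMathGo cs pos).map String.toList)
      = removeBadMathAltGo (if pos = 0 then none else cs[pos - 1]?) (cs.drop pos) := by
  fun_induction removeBadMathGo cs pos with
  | case1 pos hlt h ih =>
    exact token_case cs pos '(' " $ " (Or.inl rfl) (by decide) hlt h.1 h.2 ih
  | case2 pos hlt h1 h ih =>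
    exact token_case cs pos ')' " $ " (Or.inr (Or.inl rfl)) (by decide) hlt h.1 h.2 ih
  | case3 pos hlt h1 h2 h ih =>
    exact token_case cs pos '[' " $$ " (Or.inr (Or.inr (Or.inl rfl))) (by decide) hlt h.1 h.2 ih
  | case4 pos hlt h1 h2 h3 h ih =>
    exact token_case cs pos ']' " $$ " (Or.inr (Or.inr (Or.inr rfl))) (by decide) hlt h.1 h.2 ih
  | case5 pos hlt h1 h2 h3 h4 ih =>
    have hp : pos < cs.length := by omega
    have hp1 : pos + 1 < cs.length := by omega
    have e1 : cs.drop pos = cs[pos] :: cs[pos + 1] :: cs.drop (pos + 2) := by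
      rw [drop_cons_of_lt cs pos hp, drop_cons_of_lt cs (pos + 1) hp1]
    have hcond : ¬(cs[pos] = '\\' ∧ (cs[pos + 1] = '(' ∨ cs[pos + 1] = ')' ∨ cs[pos + 1] = '[' ∨ cs[pos + 1] = ']') ∧ (if pos = 0 then (none : Option Char) else cs[pos - 1]?) ≠ some '\\') := by
      rintro ⟨hb, hd, hpv⟩
      have hesc : ¬(0 < pos ∧ cs[pos - 1]? = some '\\') := by
        rintro ⟨hpos0, hc⟩
        rw [if_neg (by omega)] at hpv
        exact hpv hc
      have htk : ∀ d : Char, cs[pos + 1] = d → (cs.drop pos).take 2 = ['\\', d] := by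
        intro d hdd
        rw [e1]
        simp [hb, hdd]
      rcases hd with hd | hd | hd | hd
      · exact h1 ⟨htk _ hd, hesc⟩
      · exact h2 ⟨htk _ hd, hesc⟩
      · exact h3 ⟨htk _ hd, hesc⟩
      · exact h4 ⟨htk _ hd, hesc⟩
    have e2 : (if pos + 1 = 0 then (none : Option Char) else cs[pos + 1 - 1]?) = some cs[pos] := by
      rw [if_neg (by omega)]
      show cs[pos]? = some cs[pos]
      exact List.getElem?_eq_getElem hp
    have hget : cs[pos]! = cs[pos] := getElem!_pos cs pos hp
    rw [List.map_cons, join_nil_cons, ih, e2, e1, drop_cons_of_lt cs (pos + 1) hp1]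
    simp only [removeBadMathAltGo]
    rw [if_neg hcond, hget]
    simp
  | case6 pos hlt hp =>
    have e0 : cs.drop pos = [cs[pos]] := by
      rw [drop_cons_of_lt cs pos hp, List.drop_eq_nil_of_le (by omega : cs.length ≤ pos + 1)]
    have hget : cs[pos]! = cs[pos] := getElem!_pos cs pos hp
    rw [e0, hget]
    simp [removeBadMathAltGo, PySem.Chars.join_singleton]
  | case7 pos h1 h2 =>
    rw [List.drop_eq_nil_of_le (by omega), List.map_nil]
    simp [removeBadMathAltGo, PySem.Chars.join_nil]

theorem removeBadMath_spec' (content : String) :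
    removeBadMath content = removeBadMath_alt content := by
  apply String.toList_inj.mp
  rw [removeBadMath, removeBadMath_alt, PySem.Str.toList_join]
  have h := goA_eq_goB content.toList 0
  simpa using h

-- ===== VERDICT (by name: the statement is the Claim_ definition above) =====
theorem removeBadMath_spec : Claim_equal_removeBadMath := by
  intro content _
  unfold Spec_removeBadMath
  exact removeBadMath_spec' content
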